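-- pv_equiv track=rewrite | github.com/miramastoras/centrolign_analysis | analysis_notes/release2_QC_v2/permutation_test_scripts/localID_minus_CDR_permutation_per_chrom_short_indels.py | build_aligned_intervals_from_ops
-- ===== SOURCE A (Python) =====
-- def build_aligned_intervals_from_ops(cigar_ops, start_pos):
--     intervals = []
--     pos = start_pos
--     for length, op in cigar_ops:
--         if op in ("M", "=", "X"):
--             intervals.append((pos, pos + length))
--             pos += length
--         elif op in ("D", "N"):
--             pos += length
--     return intervals
-- ===== SOURCE B (Python) =====
-- def build_aligned_intervals_from_ops(cigar_ops, start_pos):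
--     # Pass 1: per-op reference advance (M/=/X/D/N consume reference, others don't).
--     advances = [length if op in ("M", "=", "X", "D", "N") else 0
--                 for length, op in cigar_ops]
--     # Pass 2: prefix table of positions BEFORE each op.
--     positions = []
--     p = start_pos
--     for a in advances:
--         positions.append(p)
--         p += a
--     # Pass 3: select aligned ops and emit intervals.
--     return [(p, p + length)
--             for p, (length, op) in zip(positions, cigar_ops)
--             if op in ("M", "=", "X")]
-- ===== Notes on version B (the rewrite author's own statement) =====
-- stated objective: alternative
-- what changed: Replaces the single running-position accumulator loop with three separate passes: a per-op advance list, an explicit prefix-position table, and a filter-and-map selection pass over the zipped table.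
import Mathlib
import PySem

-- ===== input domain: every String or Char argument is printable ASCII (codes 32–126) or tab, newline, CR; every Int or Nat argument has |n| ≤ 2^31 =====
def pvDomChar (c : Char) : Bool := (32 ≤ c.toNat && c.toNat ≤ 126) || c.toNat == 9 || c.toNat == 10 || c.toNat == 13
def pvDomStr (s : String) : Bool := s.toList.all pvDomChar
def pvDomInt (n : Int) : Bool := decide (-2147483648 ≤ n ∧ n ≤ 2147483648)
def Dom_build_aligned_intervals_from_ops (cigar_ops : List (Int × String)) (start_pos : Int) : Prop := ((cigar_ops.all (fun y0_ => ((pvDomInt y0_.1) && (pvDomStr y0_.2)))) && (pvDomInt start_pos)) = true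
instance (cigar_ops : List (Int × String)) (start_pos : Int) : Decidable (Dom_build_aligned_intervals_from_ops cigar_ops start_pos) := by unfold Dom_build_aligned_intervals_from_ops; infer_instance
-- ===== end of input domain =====

-- B rebuilds the result in three passes (advance list, prefix-position table, filter-and-map) instead of A's single running-accumulator loop; objective: alternative decomposition, same cost.


-- ===== PORT A =====
-- A: one loop maintaining (intervals, pos); appends (pos, pos+length) on M/=/X.
def build_aligned_intervals_from_ops (cigar_ops : List (Int × String)) (start_pos : Int) : List (Int × Int) :=
  (cigar_ops.foldl
    (fun (st : List (Int × Int) × Int) lo =>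
      let length := lo.1
      let op := lo.2
      if op = "M" ∨ op = "=" ∨ op = "X" then
        (st.1 ++ [(st.2, st.2 + length)], st.2 + length)
      else if op = "D" ∨ op = "N" then
        (st.1, st.2 + length)
      else st)
    ([], start_pos)).1

-- ===== PORT B =====
-- B pass 1: per-op advance
def pvAdvances (cigar_ops : List (Int × String)) : List Int :=
  cigar_ops.map (fun lo =>
    if lo.2 = "M" ∨ lo.2 = "=" ∨ lo.2 = "X" ∨ lo.2 = "D" ∨ lo.2 = "N" then lo.1 else 0)

-- B pass 2: prefix table of positions before each op (append-loop, as in Source B)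
def pvPositions (advances : List Int) (start_pos : Int) : List Int :=
  (advances.foldl (fun (st : List Int × Int) a => (st.1 ++ [st.2], st.2 + a)) ([], start_pos)).1

-- B pass 3: filter-and-map over the zipped table
def build_aligned_intervals_from_ops_alt (cigar_ops : List (Int × String)) (start_pos : Int) : List (Int × Int) :=
  ((pvPositions (pvAdvances cigar_ops) start_pos).zip cigar_ops).filterMap
    (fun plo =>
      if plo.2.2 = "M" ∨ plo.2.2 = "=" ∨ plo.2.2 = "X" then
        some (plo.1, plo.1 + plo.2.1)
      else none)

-- ===== PRECONDITION & SPEC =====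
def Spec_build_aligned_intervals_from_ops (cigar_ops : List (Int × String)) (start_pos : Int) (out : List (Int × Int)) : Prop := out = build_aligned_intervals_from_ops_alt cigar_ops start_pos
instance (cigar_ops : List (Int × String)) (start_pos : Int) (out : List (Int × Int)) : Decidable (Spec_build_aligned_intervals_from_ops cigar_ops start_pos out) := by unfold Spec_build_aligned_intervals_from_ops; infer_instance

-- ===== CLAIM (what is proved, stated in full; the proofs are below) =====
def Claim_equal_build_aligned_intervals_from_ops : Prop := ∀ (cigar_ops : List (Int × String)) (start_pos : Int), Dom_build_aligned_intervals_from_ops cigar_ops start_pos → Spec_build_aligned_intervals_from_ops cigar_ops start_pos (build_aligned_intervals_from_ops cigar_ops start_pos)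

-- ===== LEMMAS AND PROOFS =====

-- A's foldl with a nonempty interval accumulator prepends the accumulator.
theorem pvA_acc (l : List (Int × String)) (acc : List (Int × Int)) (pos : Int) :
    (l.foldl
      (fun (st : List (Int × Int) × Int) lo =>
        let length := lo.1
        let op := lo.2
        if op = "M" ∨ op = "=" ∨ op = "X" then
          (st.1 ++ [(st.2, st.2 + length)], st.2 + length)
        else if op = "D" ∨ op = "N" then
          (st.1, st.2 + length)
        else st)
      (acc, pos)).1
    = acc ++ (l.foldl
      (fun (st : List (Int × Int) × Int) lo =>
        let length := lo.1
        let op := lo.2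
        if op = "M" ∨ op = "=" ∨ op = "X" then
          (st.1 ++ [(st.2, st.2 + length)], st.2 + length)
        else if op = "D" ∨ op = "N" then
          (st.1, st.2 + length)
        else st)
      ([], pos)).1 := by
  induction l generalizing acc pos with
  | nil => simp
  | cons hd tl ih =>
    simp only [List.foldl_cons]
    split_ifs with h1 h2 <;>
      simp only [ih (acc ++ _), ih acc, ih [_], List.append_assoc, List.nil_append]

-- B's position-table foldl with a nonempty accumulator prepends the accumulator.
theorem pvPos_acc (l : List Int) (acc : List Int) (pos : Int) :
    (l.foldl (fun (st : List Int × Int) a => (st.1 ++ [st.2], st.2 + a)) (acc, pos)).1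
    = acc ++ (l.foldl (fun (st : List Int × Int) a => (st.1 ++ [st.2], st.2 + a)) ([], pos)).1 := by
  induction l generalizing acc pos with
  | nil => simp
  | cons hd tl ih =>
    simp only [List.foldl_cons, List.nil_append]
    rw [ih (acc ++ [pos]), ih [pos], List.append_assoc]

theorem pvPositions_cons (a : Int) (l : List Int) (pos : Int) :
    pvPositions (a :: l) pos = pos :: pvPositions l (pos + a) := by
  simp only [pvPositions, List.foldl_cons]
  rw [pvPos_acc]
  rfl

theorem pvMain (cigar_ops : List (Int × String)) (pos : Int) :
    build_aligned_intervals_from_ops cigar_ops pos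
    = build_aligned_intervals_from_ops_alt cigar_ops pos := by
  induction cigar_ops generalizing pos with
  | nil => rfl
  | cons hd tl ih =>
    obtain ⟨len, op⟩ := hd
    simp only [build_aligned_intervals_from_ops, build_aligned_intervals_from_ops_alt,
      pvAdvances, List.map_cons, List.foldl_cons] at *
    rw [pvPositions_cons]
    by_cases h1 : op = "M" ∨ op = "=" ∨ op = "X"
    · have hadv : (if op = "M" ∨ op = "=" ∨ op = "X" ∨ op = "D" ∨ op = "N" then len else 0) = len := by
        rcases h1 with h | h | h <;> simp [h]
      simp only [hadv, List.zip_cons_cons, List.filterMap_cons, h1, if_pos]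
      rw [pvA_acc]
      simp only [List.nil_append]
      rw [← ih (pos + len)]
      rfl
    · by_cases h2 : op = "D" ∨ op = "N"
      · have hadv : (if op = "M" ∨ op = "=" ∨ op = "X" ∨ op = "D" ∨ op = "N" then len else 0) = len := by
          rcases h2 with h | h <;> simp [h]
        simp only [List.zip_cons_cons, List.filterMap_cons]
        rw [hadv]
        simp only [h1, h2, if_pos, ite_false]
        exact ih (pos + len)
      · have hadv : (if op = "M" ∨ op = "=" ∨ op = "X" ∨ op = "D" ∨ op = "N" then len else 0) = 0 := by
          simp only [ite_eq_right_iff]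
          intro h; rcases h with h | h | h | h | h
          · exact absurd (Or.inl h) h1
          · exact absurd (Or.inr (Or.inl h)) h1
          · exact absurd (Or.inr (Or.inr h)) h1
          · exact absurd (Or.inl h) h2
          · exact absurd (Or.inr h) h2
        simp only [List.zip_cons_cons, List.filterMap_cons]
        rw [hadv]
        simp only [h1, h2, ite_false, add_zero]
        exact ih pos

-- ===== VERDICT (by name: the statement is the Claim_ definition above) =====
theorem build_aligned_intervals_from_ops_spec : Claim_equal_build_aligned_intervals_from_ops := by
  intro cigar_ops start_pos _
  exact pvMain cigar_ops start_pos
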